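-- pv_equiv track=rewrite | github.com/chuckgurley/week_4_day3_homework | 3rd_time_and_space.py | partlist
-- ===== SOURCE A (Python) =====
-- def partlist(arr):
--     if len(arr) < 2:
--         return ("Invalid input")
--     else:
--         answer_list = []
--         for i in range (1,len(arr)):
--             first_part = " ".join(arr[:i])
--             second_part = " ".join(arr[i:])
--             answer_list.append((first_part, second_part))
--         return answer_list
-- ===== SOURCE B (Python) =====
-- def partlist(arr):
--     n = len(arr)
--     if n < 2:
--         return "Invalid input"
--     acc = arr[0]
--     prefixes = [acc]
--     for w in arr[1:-1]:
--         acc = acc + " " + w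
--         prefixes.append(acc)
--     acc = arr[-1]
--     suffixes = [acc]
--     for w in reversed(arr[1:-1]):
--         acc = w + " " + acc
--         suffixes.append(acc)
--     suffixes.reverse()
--     return list(zip(prefixes, suffixes))
-- ===== Notes on version B (the rewrite author's own statement) =====
-- stated objective: faster
-- what changed: Instead of re-joining both slices from scratch for every split point (quadratic re-concatenation), B builds the prefix strings in one forward incremental pass and the suffix strings in one backward incremental pass and zips the two tables.
-- outside the precondition, e.g. on partlist([]): A returns 'Invalid input', B returns 'Invalid input'; on partlist(['a']): A returns 'Invalid input', B returns 'Invalid input'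
import Mathlib
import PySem

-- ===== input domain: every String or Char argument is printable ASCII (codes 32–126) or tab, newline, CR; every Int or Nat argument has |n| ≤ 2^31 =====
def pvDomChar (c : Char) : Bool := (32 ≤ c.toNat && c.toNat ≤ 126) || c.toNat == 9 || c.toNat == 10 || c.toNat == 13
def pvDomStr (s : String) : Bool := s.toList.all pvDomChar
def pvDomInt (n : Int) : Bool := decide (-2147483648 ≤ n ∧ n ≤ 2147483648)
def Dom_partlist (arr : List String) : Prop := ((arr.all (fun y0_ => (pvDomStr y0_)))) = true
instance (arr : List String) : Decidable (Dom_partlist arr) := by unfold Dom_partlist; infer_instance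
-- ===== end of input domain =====

-- B replaces A's per-split re-joining of both slices by one forward incremental prefix pass and one
-- backward incremental suffix pass, zipped together (alternative decomposition; return value only).

-- ===== PORT A =====
def partlist (arr : List String) : List (String × String) :=
  if arr.length < 2 then []   -- A returns the bare string "Invalid input" here: excluded by Pre_
  else
    (PySem.List.pyRange 1 arr.length).foldl
      (fun acc i =>
        acc ++ [(PySem.Str.join " " (PySem.List.slice arr none (some i)),
                 PySem.Str.join " " (PySem.List.slice arr (some i) none))]) []

-- ===== PORT B =====
def partlist_alt (arr : List String) : List (String × String) :=
  if arr.length < 2 then []   -- B returns the bare string "Invalid input" here: excluded by Pre_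
  else
    let mid := PySem.List.slice arr (some 1) (some (-1))      -- arr[1:-1]
    let a0 := PySem.List.pyGetD arr 0 ""                      -- arr[0]
    let pst := mid.foldl
      (fun (st : List String × String) w => (st.1 ++ [st.2 ++ " " ++ w], st.2 ++ " " ++ w))
      ([a0], a0)
    let aL := PySem.List.pyGetD arr (-1) ""                   -- arr[-1]
    let sst := mid.reverse.foldl
      (fun (st : List String × String) w => (st.1 ++ [w ++ " " ++ st.2], w ++ " " ++ st.2))
      ([aL], aL)
    pst.1.zip sst.1.reverse

-- ===== PRECONDITION & SPEC =====
-- Pre_ excludes lists of fewer than two elements, on which A returns the bare string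
-- "Invalid input" instead of a list of pairs (not a value of the declared return type).
def Pre_partlist (arr : List String) : Prop := 2 ≤ arr.length
instance (arr : List String) : Decidable (Pre_partlist arr) := by unfold Pre_partlist; infer_instance
def pvWitness_partlist : List String := ["ab", "c d"]

def Spec_partlist (arr : List String) (out : List (String × String)) : Prop := out = partlist_alt arr
instance (arr : List String) (out : List (String × String)) : Decidable (Spec_partlist arr out) := by unfold Spec_partlist; infer_instance

-- ===== CLAIM (what is proved, stated in full; the proofs are below) =====
def Claim_equal_partlist : Prop := ∀ (arr : List String), Dom_partlist arr → Pre_partlist arr → Spec_partlist arr (partlist arr)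

-- ===== LEMMAS AND PROOFS =====

-- " ".join of a singleton is the string itself
theorem pvJoin_single (w : String) : PySem.Str.join " " [w] = w := by
  rw [← String.toList_inj]
  simp [PySem.Str.toList_join, PySem.Chars.join_singleton]

-- " ".join of a cons onto a nonempty list
theorem pvJoin_cons (w : String) (p : List String) (hp : p ≠ []) :
    PySem.Str.join " " (w :: p) = w ++ " " ++ PySem.Str.join " " p := by
  rcases p with _ | ⟨q, rest⟩
  · exact absurd rfl hp
  · rw [← String.toList_inj]
    simp [PySem.Str.toList_join, PySem.Chars.join_cons_cons, String.toList_append]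

-- " ".join of a snoc onto a nonempty list
theorem pvJoin_snoc (p : List String) (w : String) (hp : p ≠ []) :
    PySem.Str.join " " (p ++ [w]) = PySem.Str.join " " p ++ " " ++ w := by
  induction p with
  | nil => exact absurd rfl hp
  | cons x xs ih =>
    cases xs with
    | nil => simp [pvJoin_cons x [w] (by simp), pvJoin_single]
    | cons y ys =>
      rw [List.cons_append, pvJoin_cons x ((y :: ys) ++ [w]) (by simp),
          ih (by simp), pvJoin_cons x (y :: ys) (by simp)]
      rw [← String.toList_inj]
      simp [String.toList_append]

-- the forward incremental pass computes the prefix joins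
theorem pvPref_fold (mid : List String) (out : List String) (init : List String)
    (hinit : init ≠ []) :
    (mid.foldl
      (fun (st : List String × String) w => (st.1 ++ [st.2 ++ " " ++ w], st.2 ++ " " ++ w))
      (out ++ [PySem.Str.join " " init], PySem.Str.join " " init)).1
    = out ++ (List.range (mid.length + 1)).map
        (fun k => PySem.Str.join " " (init ++ mid.take k)) := by
  induction mid generalizing out init with
  | nil => simp
  | cons w ws ih =>
    have hx : PySem.Str.join " " init ++ " " ++ w = PySem.Str.join " " (init ++ [w]) :=
      (pvJoin_snoc init w hinit).symm
    simp only [List.foldl_cons, hx, List.append_assoc]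
    rw [show (out ++ ([PySem.Str.join " " init] ++ [PySem.Str.join " " (init ++ [w])]))
          = (out ++ [PySem.Str.join " " init]) ++ [PySem.Str.join " " (init ++ [w])] by
        simp]
    rw [ih (out ++ [PySem.Str.join " " init]) (init ++ [w]) (by simp)]
    simp [List.range_succ_eq_map, List.map_map, List.append_assoc, Function.comp]

-- the backward incremental pass computes the suffix joins
theorem pvSuf_fold (midR : List String) (out : List String) (tail : List String)
    (htail : tail ≠ []) :
    (midR.foldl
      (fun (st : List String × String) w => (st.1 ++ [w ++ " " ++ st.2], w ++ " " ++ st.2))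
      (out ++ [PySem.Str.join " " tail], PySem.Str.join " " tail)).1
    = out ++ (List.range (midR.length + 1)).map
        (fun k => PySem.Str.join " " ((midR.take k).reverse ++ tail)) := by
  induction midR generalizing out tail with
  | nil => simp
  | cons w ws ih =>
    have hx : w ++ " " ++ PySem.Str.join " " tail = PySem.Str.join " " (w :: tail) :=
      (pvJoin_cons w tail htail).symm
    simp only [List.foldl_cons, hx, List.append_assoc]
    rw [show (out ++ ([PySem.Str.join " " tail] ++ [PySem.Str.join " " (w :: tail)]))
          = (out ++ [PySem.Str.join " " tail]) ++ [PySem.Str.join " " (w :: tail)] by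
        simp]
    rw [ih (out ++ [PySem.Str.join " " tail]) (w :: tail) (by simp)]
    simp [List.range_succ_eq_map, List.map_map, List.append_assoc, Function.comp]

-- arr[1:-1] of a cons with nonempty tail
theorem pvSlice_mid (a0 : String) (rest : List String) (_hr : rest ≠ []) :
    PySem.List.slice (a0 :: rest) (some 1) (some (-1)) = rest.dropLast := by
  have h0 : ¬((rest.length : Int) < 0) := by omega
  simp [PySem.List.slice, PySem.List.clampIdx, h0, List.dropLast_eq_take]

-- arr[0]
theorem pvGet_zero (a0 : String) (rest : List String) :
    PySem.List.pyGetD (a0 :: rest) 0 "" = a0 := by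
  simp [PySem.List.pyGetD, PySem.List.pyGet?, PySem.List.pyIdx?]

-- arr[-1]
theorem pvGet_last (l : List String) (h : l ≠ []) :
    PySem.List.pyGetD l (-1) "" = l.getLast h := by
  have hl : 0 < l.length := List.length_pos_iff.mpr h
  have h1 : 1 ≤ l.length := hl
  simp [PySem.List.pyGetD, PySem.List.pyGet?, PySem.List.pyIdx?, h1,
        List.getElem?_eq_getElem (by omega : l.length - 1 < l.length),
        List.getLast_eq_getElem]

-- a map over a range, reversed
theorem pvRevMap {α : Type} (m : Nat) (f : Nat → α) :
    ((List.range (m + 1)).map f).reverse = (List.range (m + 1)).map (fun k => f (m - k)) := by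
  apply List.ext_getElem
  · simp
  · intro i h1 h2
    simp only [List.getElem_reverse, List.getElem_map, List.getElem_range,
               List.length_map, List.length_range]
    rfl

-- ===== VERDICT (by name: the statement is the Claim_ definition above) =====
theorem partlist_spec : Claim_equal_partlist := by
  intro arr _ hpre
  unfold Spec_partlist
  cases arr with
  | nil => simp [Pre_partlist] at hpre
  | cons a0 rest =>
    have hr : rest ≠ [] := by
      intro h; subst h; simp [Pre_partlist] at hpre
    have hrl : 0 < rest.length := List.length_pos_iff.mpr hr
    have hlen2 : ¬((a0 :: rest).length < 2) := by simp; omega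
    have hdec : rest.dropLast ++ [rest.getLast hr] = rest := List.dropLast_append_getLast hr
    have hm : rest.dropLast.length + 1 = rest.length := by
      conv_rhs => rw [← hdec]
      simp
    -- B's value
    have hB : partlist_alt (a0 :: rest)
        = ((List.range (rest.dropLast.length + 1)).map
             (fun k => PySem.Str.join " " ([a0] ++ rest.dropLast.take k))).zip
          (((List.range (rest.dropLast.length + 1)).map
             (fun k => PySem.Str.join " "
               ((rest.dropLast.reverse.take k).reverse ++ [rest.getLast hr]))).reverse) := by
      unfold partlist_alt
      rw [if_neg hlen2]
      simp only [pvSlice_mid a0 rest hr, pvGet_zero,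
                 pvGet_last (a0 :: rest) (by simp), List.getLast_cons hr]
      rw [show (([a0], a0) : List String × String)
            = (([] : List String) ++ [PySem.Str.join " " [a0]], PySem.Str.join " " [a0]) by
          simp [pvJoin_single]]
      rw [show (([rest.getLast hr], rest.getLast hr) : List String × String)
            = (([] : List String) ++ [PySem.Str.join " " [rest.getLast hr]],
               PySem.Str.join " " [rest.getLast hr]) by
          simp [pvJoin_single]]
      rw [pvPref_fold rest.dropLast [] [a0] (by simp),
          pvSuf_fold rest.dropLast.reverse [] [rest.getLast hr] (by simp)]
      simp
    -- simplify B's suffix table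
    have hB2 : partlist_alt (a0 :: rest)
        = (List.range (rest.dropLast.length + 1)).map
            (fun k => (PySem.Str.join " " ([a0] ++ rest.dropLast.take k),
                       PySem.Str.join " " (rest.dropLast.drop k ++ [rest.getLast hr]))) := by
      rw [hB, pvRevMap]
      rw [show (List.range (rest.dropLast.length + 1)).map
            (fun k => PySem.Str.join " "
              ((rest.dropLast.reverse.take (rest.dropLast.length - k)).reverse
                ++ [rest.getLast hr]))
          = (List.range (rest.dropLast.length + 1)).map
            (fun k => PySem.Str.join " " (rest.dropLast.drop k ++ [rest.getLast hr])) from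
        List.map_congr_left (by
          intro k hk
          have hk' : k ≤ rest.dropLast.length := by
            simp only [List.mem_range] at hk; omega
          congr 2
          rw [List.take_reverse, List.reverse_reverse]
          congr 1
          omega)]
      exact List.zip_map'
    -- A's value
    have hA : partlist (a0 :: rest)
        = (List.range rest.length).map
            (fun k => (PySem.Str.join " " ((a0 :: rest).take (k + 1)),
                       PySem.Str.join " " ((a0 :: rest).drop (k + 1)))) := by
      unfold partlist
      rw [if_neg hlen2, PySem.List.foldl_append_singleton_eq_map, PySem.List.pyRange_one,
          List.map_map]
      rw [show ((((a0 :: rest).length : Int)) - 1).toNat = rest.length by simp]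
      apply List.map_congr_left
      intro k _
      have h1 : (0:Int) ≤ 1 + (k : Int) := by positivity
      have h2 : ((1 : Int) + (k : Int)).toNat = k + 1 := by omega
      simp only [Function.comp_apply, PySem.List.slice_to _ h1, PySem.List.slice_from _ h1, h2]
    -- combine
    rw [hA, hB2, ← hm]
    apply List.map_congr_left
    intro k hk
    have hk' : k ≤ rest.dropLast.length := by
      simp only [List.mem_range] at hk; omega
    have ht : (a0 :: rest).take (k + 1) = [a0] ++ rest.dropLast.take k := by
      rw [List.take_succ_cons]
      conv_lhs => rw [← hdec]
      rw [List.take_append_of_le_length hk']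
      rfl
    have hd : (a0 :: rest).drop (k + 1) = rest.dropLast.drop k ++ [rest.getLast hr] := by
      rw [List.drop_succ_cons]
      conv_lhs => rw [← hdec]
      rw [List.drop_append_of_le_length hk']
    rw [ht, hd]
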